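-- pv_equiv track=rewrite | github.com/samhain13/mdsite | mdsite/helpers.py | get_previous_next
-- ===== SOURCE A (Python) =====
-- def get_previous_next(page, files):
--     previous = None
--     next = None
--     current_index = None
--     # Makes no sense going further if we have no files or we're using index.md.
--     if not files or page["filename"].endswith("index.md"):
--         return previous, next, current_index
--     current_index = files.index([x for x in files \
--         if x["filename"] == page["filename"]][0])
--     if current_index > 0:
--         previous = files[current_index - 1]
--     if (current_index + 1) < len(files):
--         next = files[current_index + 1]
--     return previous, next, current_index
-- ===== SOURCE B (Python) =====
-- def get_previous_next(page, files):
--     if not files or page["filename"].endswith("index.md"):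
--         return None, None, None
--     name = page["filename"]
--     # Precompute each position's neighbours by zipping the list with shifted
--     # copies of itself; the matching triple is the answer directly.
--     prevs = [None] + files[:-1]
--     nexts = files[1:] + [None]
--     return [(p, nx, i) for i, (p, c, nx) in enumerate(zip(prevs, files, nexts))
--             if c["filename"] == name][0]
-- ===== Notes on version B (the rewrite author's own statement) =====
-- stated objective: alternative
-- what changed: Replaces A's filter-the-matching-dicts then files.index then conditional neighbour indexing with zipping files against two shifted copies of itself ([None]+files[:-1] and files[1:]+[None]) so each element is paired with its neighbours up front and the matching (previous, next, index) triple is returned directly.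
-- outside the precondition, e.g. on get_previous_next({'filename': 'a.md'}, [{'filename': 'b.md'}]): A raises IndexError, B raises IndexError; on get_previous_next({}, [{'filename': 'b.md'}]): A raises KeyError, B raises KeyError
import Mathlib
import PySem

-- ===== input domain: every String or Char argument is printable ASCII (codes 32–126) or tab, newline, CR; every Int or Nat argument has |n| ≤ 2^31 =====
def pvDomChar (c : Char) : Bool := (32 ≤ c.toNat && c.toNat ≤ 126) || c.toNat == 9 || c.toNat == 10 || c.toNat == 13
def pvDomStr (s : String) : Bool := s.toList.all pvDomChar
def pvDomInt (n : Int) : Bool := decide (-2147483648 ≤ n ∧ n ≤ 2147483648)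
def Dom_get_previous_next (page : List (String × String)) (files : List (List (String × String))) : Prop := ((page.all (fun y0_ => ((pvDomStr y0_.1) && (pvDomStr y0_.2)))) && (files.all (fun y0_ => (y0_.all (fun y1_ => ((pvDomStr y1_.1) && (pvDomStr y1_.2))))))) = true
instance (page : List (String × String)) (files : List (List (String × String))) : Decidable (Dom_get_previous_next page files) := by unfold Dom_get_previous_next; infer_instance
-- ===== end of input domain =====

-- B replaces A's filter-then-files.index search and conditional neighbour indexing with
-- zipping the list against shifted copies of itself ([None]+files[:-1], files[1:]+[None]),
-- so the matching triple (previous, next, index) is read off directly; objective: alternative.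

-- ===== PORT A =====
def get_previous_next (page : List (String × String)) (files : List (List (String × String))) : (Option (List (String × String))) × (Option (List (String × String))) × Option Int :=
  -- previous = None; next = None; current_index = None
  if files.isEmpty then (none, none, none)       -- 'not files' short-circuits before page["filename"]
  else
    match List.lookup "filename" page with
    | none => (none, none, none)                 -- KeyError in Python; outside Pre_
    | some name =>
      if PySem.Str.endswith name "index.md" then (none, none, none)
      else
        match files.filter (fun x => List.lookup "filename" x == some name) with
        | [] => (none, none, none)               -- [...][0] IndexError in Python; outside Pre_
        | m :: _ =>
          match PySem.List.index? files m with
          | none => (none, none, none)           -- unreachable: m ∈ files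
          | some ci =>
            let previous := if ci > 0 then files[ci - 1]? else none
            let next := if ci + 1 < files.length then files[ci + 1]? else none
            (previous, next, some (ci : Int))

-- ===== PORT B =====
-- Python's heterogeneous lists [None]+files[:-1] and files[1:]+[None] are ported as
-- List (Option file): None ↦ none, a dict ↦ some dict.
def get_previous_next_alt (page : List (String × String)) (files : List (List (String × String))) : (Option (List (String × String))) × (Option (List (String × String))) × Option Int :=
  if files.isEmpty then (none, none, none)
  else
    match List.lookup "filename" page with
    | none => (none, none, none)                 -- KeyError in Python; outside Pre_
    | some name =>
      if PySem.Str.endswith name "index.md" then (none, none, none)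
      else
        let prevs : List (Option (List (String × String))) :=
          none :: (PySem.List.slice files none (some (-1))).map some      -- [None] + files[:-1]
        let nexts : List (Option (List (String × String))) :=
          (PySem.List.slice files (some 1) none).map some ++ [none]       -- files[1:] + [None]
        match ((PySem.List.enumerate (prevs.zip (files.zip nexts)) 0).filter
                (fun q => List.lookup "filename" q.2.2.1 == some name)).head? with
        | none => (none, none, none)             -- [...][0] IndexError in Python; outside Pre_
        | some (i, (p, _, nx)) => (p, nx, some i)

-- ===== PRECONDITION & SPEC =====
-- Pre_ excludes exactly the inputs where the Python raises: page lacking "filename" (KeyError,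
-- only reached when files is nonempty), some file lacking "filename" (KeyError inside the
-- comprehension), or no file matching page's filename ([...][0] IndexError).
def Pre_get_previous_next (page : List (String × String)) (files : List (List (String × String))) : Prop :=
  files = [] ∨
    ((List.lookup "filename" page).isSome = true ∧
      (PySem.Str.endswith ((List.lookup "filename" page).getD "") "index.md" = true ∨
        ((∀ x ∈ files, (List.lookup "filename" x).isSome = true) ∧
         ∃ x ∈ files, List.lookup "filename" x = List.lookup "filename" page)))
instance (page : List (String × String)) (files : List (List (String × String))) : Decidable (Pre_get_previous_next page files) := by unfold Pre_get_previous_next; infer_instance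

def pvWitness_get_previous_next : (List (String × String)) × (List (List (String × String))) :=
  ([("filename", "a.md")], [[("filename", "a.md")], [("filename", "b.md")]])

def Spec_get_previous_next (page : List (String × String)) (files : List (List (String × String))) (out : (Option (List (String × String))) × (Option (List (String × String))) × Option Int) : Prop := out = get_previous_next_alt page files
instance (page : List (String × String)) (files : List (List (String × String))) (out : (Option (List (String × String))) × (Option (List (String × String))) × Option Int) : Decidable (Spec_get_previous_next page files out) := by unfold Spec_get_previous_next; infer_instance

-- ===== CLAIM (what is proved, stated in full; the proofs are below) =====
def Claim_equal_get_previous_next : Prop := ∀ (page : List (String × String)) (files : List (List (String × String))), Dom_get_previous_next page files → Pre_get_previous_next page files → Spec_get_previous_next page files (get_previous_next page files)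

-- ===== LEMMAS AND PROOFS =====

-- The zipped triple list unfolds structurally: head carries p0, x and xs[0]?,
-- and the tail is the same construction on xs with p0 := some x.
theorem pv_zip_cons (p0 : Option (List (String × String))) (x : List (String × String)) (xs : List (List (String × String))) :
    ((p0 :: (x :: xs).dropLast.map some).zip ((x :: xs).zip (xs.map some ++ [none]))) =
      (p0, (x, xs[0]?)) :: ((some x :: xs.dropLast.map some).zip (xs.zip (xs.tail.map some ++ [none]))) := by
  cases xs with
  | nil => simp
  | cons y ys => simp

-- Relates A's value-filter + index? with the head of B's filtered enumerated zip,
-- generalized over the start offset s and the first "previous" entry p0.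
theorem pv_filter_zip (name : String) :
    ∀ (files : List (List (String × String))) (s : Int) (p0 : Option (List (String × String))),
      (files.filter (fun x => List.lookup "filename" x == some name) = [] ∧
        (PySem.List.enumerate ((p0 :: files.dropLast.map some).zip (files.zip (files.tail.map some ++ [none]))) s).filter
          (fun q => List.lookup "filename" q.2.2.1 == some name) = []) ∨
      (∃ (k : Nat) (m : List (String × String)) (rest : List (List (String × String))),
        files.filter (fun x => List.lookup "filename" x == some name) = m :: rest ∧
        PySem.List.index? files m = some k ∧
        ((PySem.List.enumerate ((p0 :: files.dropLast.map some).zip (files.zip (files.tail.map some ++ [none]))) s).filter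
          (fun q => List.lookup "filename" q.2.2.1 == some name)).head? =
          some (s + (k : Int), ((if k = 0 then p0 else files[k - 1]?), m, files[k + 1]?))) := by
  intro files
  induction files with
  | nil => intro s p0; left; simp [PySem.List.enumerate_nil]
  | cons x xs ih =>
    intro s p0
    have hz := pv_zip_cons p0 x xs
    by_cases h : (List.lookup "filename" x == some name) = true
    · right
      refine ⟨0, x, xs.filter (fun x => List.lookup "filename" x == some name), ?_, ?_, ?_⟩
      · simp [h]
      · exact PySem.List.index?_cons_self x xs
      · simp only [List.tail_cons]
        rw [hz, PySem.List.enumerate_cons]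
        simp [h]
    · rcases ih (s + 1) (some x) with ⟨h1, h2⟩ | ⟨k, m, rest, h1, h2, h3⟩
      · left
        constructor
        · simpa [List.filter_cons, h] using h1
        · simp only [List.tail_cons]
          rw [hz, PySem.List.enumerate_cons]
          simpa [List.filter_cons, h] using h2
      · right
        have hm : (List.lookup "filename" m == some name) = true := by
          have : m ∈ xs.filter (fun x => List.lookup "filename" x == some name) := by
            rw [h1]; exact List.mem_cons_self
          exact (List.mem_filter.mp this).2
        have hxm : x ≠ m := by
          intro he; rw [he] at h; exact h hm
        refine ⟨k + 1, m, rest, ?_, ?_, ?_⟩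
        · simpa [List.filter_cons, h] using h1
        · rw [PySem.List.index?_cons_of_ne xs hxm, h2]; rfl
        · simp only [List.tail_cons]
          rw [hz, PySem.List.enumerate_cons]
          rw [List.filter_cons_of_neg (by simpa using h)]
          rw [h3]
          have ep : (if k = 0 then some x else xs[k - 1]?) = (x :: xs)[k + 1 - 1]? := by
            cases k with
            | zero => simp
            | succ k' => simp
          rw [ep]
          simp only [Option.some.injEq, Prod.mk.injEq, List.getElem?_cons_succ]
          refine ⟨by push_cast; ring, ?_⟩
          simp

theorem get_previous_next_eq_alt (page : List (String × String)) (files : List (List (String × String))) :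
    get_previous_next page files = get_previous_next_alt page files := by
  unfold get_previous_next get_previous_next_alt
  by_cases hf : files.isEmpty = true
  · rw [if_pos hf, if_pos hf]
  · rw [if_neg hf, if_neg hf]
    cases hlk : List.lookup "filename" page with
    | none => rfl
    | some name =>
      by_cases he : PySem.Str.endswith name "index.md" = true
      · simp only [he, if_true]
      · simp only [he, PySem.List.slice_to_neg_one, PySem.List.slice_from_one]
        rcases pv_filter_zip name files 0 none with ⟨h1, h2⟩ | ⟨k, m, rest, h1, h2, h3⟩
        · rw [h1, h2]; rfl
        · rw [h1, h3]
          simp only [h2]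
          obtain ⟨hklen, -, -⟩ := PySem.List.getElem_of_index?_eq_some h2
          by_cases hk : k > 0
          · simp only [hk, if_true, if_neg (by omega : ¬ k = 0)]
            by_cases hl : k + 1 < files.length
            · simp [hl]
            · simp [hl]
          · have hk0 : k = 0 := by omega
            subst hk0
            simp only [Nat.lt_irrefl, if_false]
            by_cases hl : 0 + 1 < files.length
            · simp [hl]
            · simp [hl]

-- ===== VERDICT (by name: the statement is the Claim_ definition above) =====
theorem get_previous_next_spec : Claim_equal_get_previous_next := by
  intro page files _ _
  unfold Spec_get_previous_next
  exact get_previous_next_eq_alt page files
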